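-- pv_equiv track=rewrite | github.com/KANABOON1/CS61A | cats/cats.py | shifty_shifts
-- ===== SOURCE A (Python) =====
-- def shifty_shifts(start, goal, limit):
--     """
--     递归中limit的处理,让limit也参与递归.
--     基本的处理思路还是 recursive faith of leap.
--     A diff function for autocorrect that determines how many letters
--     in START need to be substituted to create GOAL, then adds the difference in
--     their lengths.
--     """
--     # BEGIN PROBLEM 6
--     if limit < 0: # base case
--         # 有关 limit的 base case,当差异>limit时,返回值比limit大
--         # minimize the computation to do:如果差异已经大于limit,则不需要继续做下去.
--         return 0
--     if len(start) == 0 or len(goal) == 0:  # base case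
--         return abs(len(start) - len(goal))
--     elif start[0] == goal[0]:
--         return shifty_shifts(start[1:], goal[1:], limit)
--     else:  # note:需要考虑参数limit,返回值比limit大1
--         return shifty_shifts(start[1:], goal[1:], limit - 1) + 1
-- ===== SOURCE B (Python) =====
-- def shifty_shifts(start, goal, limit):
--     if limit < 0:
--         return 0
--     subs = 0
--     for a, b in zip(start, goal):
--         if a != b:
--             subs += 1
--             limit -= 1
--             if limit < 0:
--                 return subs
--     return subs + abs(len(start) - len(goal))
-- ===== Notes on version B (the rewrite author's own statement) =====
-- stated objective: faster
-- what changed: Replaced the recursive string-slicing descent with a single index-based pass over zip(start, goal) keeping a substitution counter and an early return when the limit is exhausted.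
import Mathlib
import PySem

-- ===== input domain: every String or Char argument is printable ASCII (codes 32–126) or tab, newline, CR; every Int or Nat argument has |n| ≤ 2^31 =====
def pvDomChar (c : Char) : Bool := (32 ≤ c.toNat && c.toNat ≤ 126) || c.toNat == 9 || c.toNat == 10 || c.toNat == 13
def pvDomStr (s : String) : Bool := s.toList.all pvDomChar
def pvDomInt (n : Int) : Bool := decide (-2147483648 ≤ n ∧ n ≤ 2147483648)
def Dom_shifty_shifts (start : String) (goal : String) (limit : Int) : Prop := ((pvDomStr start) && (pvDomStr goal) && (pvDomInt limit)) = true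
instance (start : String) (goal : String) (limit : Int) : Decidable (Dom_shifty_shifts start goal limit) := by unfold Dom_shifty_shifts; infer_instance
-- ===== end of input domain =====

-- B replaces A's recursive string-slicing descent with a single index-based pass
-- over the zipped characters (objective: faster, O(n) instead of O(n^2)).


-- ===== PORT A =====
-- A's recursion on the two strings, transliterated over their character lists
-- (start[1:] becomes the tail; abs(len(start)-len(goal)) is natAbs of the Int difference).
def shiftyRecA : List Char → List Char → Int → Int
  | s, g, l =>
    if l < 0 then 0
    else
      match s, g with
      | [], g => ((0 : Int) - (g.length : Int)).natAbs
      | s, [] => ((s.length : Int) - (0 : Int)).natAbs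
      | a :: s', b :: g' =>
        if a = b then shiftyRecA s' g' l else shiftyRecA s' g' (l - 1) + 1

def shifty_shifts (start : String) (goal : String) (limit : Int) : Int :=
  shiftyRecA start.toList goal.toList limit

-- ===== PORT B =====
-- B's single pass: the for-loop over zip(start, goal), returning (subs, earlyReturn?).
def shiftyLoopB : List (Char × Char) → Int → Int → Int × Bool
  | [], _, subs => (subs, false)
  | (a, b) :: rest, l, subs =>
    if a ≠ b then
      if l - 1 < 0 then (subs + 1, true) else shiftyLoopB rest (l - 1) (subs + 1)
    else shiftyLoopB rest l subs

def shifty_shifts_alt (start : String) (goal : String) (limit : Int) : Int :=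
  if limit < 0 then 0
  else
    let r := shiftyLoopB (start.toList.zip goal.toList) limit 0
    if r.2 then r.1
    else r.1 + ((start.toList.length : Int) - (goal.toList.length : Int)).natAbs

-- ===== PRECONDITION & SPEC =====
def Spec_shifty_shifts (start : String) (goal : String) (limit : Int) (out : Int) : Prop := out = shifty_shifts_alt start goal limit
instance (start : String) (goal : String) (limit : Int) (out : Int) : Decidable (Spec_shifty_shifts start goal limit out) := by unfold Spec_shifty_shifts; infer_instance

-- ===== CLAIM (what is proved, stated in full; the proofs are below) =====
def Claim_equal_shifty_shifts : Prop := ∀ (start : String) (goal : String) (limit : Int), Dom_shifty_shifts start goal limit → Spec_shifty_shifts start goal limit (shifty_shifts start goal limit)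

-- ===== LEMMAS AND PROOFS =====

-- The accumulator of B's loop only shifts the returned count.
theorem shiftyLoopB_shift (p : List (Char × Char)) (l c : Int) :
    shiftyLoopB p l c = (c + (shiftyLoopB p l 0).1, (shiftyLoopB p l 0).2) := by
  induction p generalizing l c with
  | nil => simp [shiftyLoopB]
  | cons hd tl ih =>
    obtain ⟨a, b⟩ := hd
    by_cases hab : a = b
    · simp only [shiftyLoopB, ne_eq, hab, not_true_eq_false, if_false, ite_false]
      exact ih l c
    · by_cases hl : l - 1 < 0
      · simp [shiftyLoopB, hab, hl]
      · simp only [shiftyLoopB, ne_eq, hab, not_false_eq_true, if_true, ite_true, hl, if_false,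
          ite_false]
        rw [ih (l - 1) (c + 1), ih (l - 1) (0 + 1)]
        simp only [Prod.mk.injEq]
        exact ⟨by ring, by trivial⟩

theorem shiftyRec_eq_loop (s : List Char) :
    ∀ (g : List Char) (l : Int), 0 ≤ l →
      shiftyRecA s g l =
        (if (shiftyLoopB (s.zip g) l 0).2 then (shiftyLoopB (s.zip g) l 0).1
         else (shiftyLoopB (s.zip g) l 0).1 + ((s.length : Int) - (g.length : Int)).natAbs) := by
  induction s with
  | nil =>
    intro g l hl
    rw [shiftyRecA.eq_def]
    simp [shiftyLoopB, not_lt.mpr hl]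
  | cons a s' ih =>
    intro g l hl
    match g with
    | [] =>
      rw [shiftyRecA.eq_def]
      simp [shiftyLoopB, not_lt.mpr hl]
    | b :: g' =>
      rw [shiftyRecA.eq_def]
      simp only [not_lt.mpr hl, if_false, ite_false, List.zip_cons_cons, List.length_cons]
      by_cases hab : a = b
      · simp only [hab, if_true, ite_true, shiftyLoopB, ne_eq, not_true_eq_false, if_false,
          ite_false]
        rw [ih g' l hl]
        split <;> simp
      · simp only [hab, if_false, shiftyLoopB, ne_eq, not_false_eq_true, if_true]
        by_cases hl1 : l - 1 < 0
        · rw [shiftyRecA.eq_def]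
          simp [hl1]
        · rw [ih g' (l - 1) (not_lt.mp hl1)]
          rw [shiftyLoopB_shift (s'.zip g') (l - 1) (0 + 1)]
          simp only [hl1, if_false, ite_false]
          split <;> simp <;> ring

-- ===== VERDICT (by name: the statement is the Claim_ definition above) =====
theorem shifty_shifts_spec : Claim_equal_shifty_shifts := by
  intro start goal limit _
  unfold Spec_shifty_shifts shifty_shifts shifty_shifts_alt
  by_cases hl : limit < 0
  · rw [shiftyRecA.eq_def]
    simp [hl]
  · rw [shiftyRec_eq_loop start.toList goal.toList limit (not_lt.mp hl)]
    simp [hl]
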